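-- pv_equiv track=rewrite | github.com/KrystianGrabowski/University | Rok I/Python/OLD/Wprawka 4.01/Wprawka.py | wyrazy_ciagu
-- ===== SOURCE A (Python) =====
-- def wyrazy_ciagu(T, tab2, tab3):
--     Wyniki = []
--     maks = tab3[0]
--     for k in tab3:
--         if k > maks:
--             maks = k
--     for n in range(len(T), maks + 1):
--         T.append(0)
--         poz = 1
--         for wart in tab2:
--             T[n] += wart * T[n - poz]
--             poz += 1
--     for w in tab3:
--         Wyniki.append(T[w])
--     return Wyniki
-- ===== SOURCE B (Python) =====
-- def wyrazy_ciagu(T, tab2, tab3):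
--     k = len(tab2)
--     L0 = len(T)
--     maks = max(tab3)
--     L = max(L0, maks + 1)
--     if maks >= L0 and k > L0:
--         raise ValueError("need at least as many initial terms as coefficients")
--     idx = [w if w >= 0 else L + w for w in tab3]
--     wanted = set(i for i in idx if i >= L0)
--     vals = {}
--     window = list(reversed(T[L0 - k:]))
--     for n in range(L0, maks + 1):
--         v = sum(c * x for c, x in zip(tab2, window))
--         if n in wanted:
--             vals[n] = v
--         window = [v] + window[:-1]
--     return [T[i] if i < L0 else vals[i] for i in idx]
-- ===== Notes on version B (the rewrite author's own statement) =====
-- stated objective: alternative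
-- what changed: B never materialises the extended sequence list A builds and mutates in place: it resolves (possibly negative) query indices up front, slides a fixed k-term window through the recurrence once, and records only the queried terms in a dict; memory drops from O(maks) to O(k + |tab3|).
-- outside the precondition, e.g. on wyrazy_ciagu([1], [1, 1], [1]): A returns [2], B raises ValueError
import Mathlib
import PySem

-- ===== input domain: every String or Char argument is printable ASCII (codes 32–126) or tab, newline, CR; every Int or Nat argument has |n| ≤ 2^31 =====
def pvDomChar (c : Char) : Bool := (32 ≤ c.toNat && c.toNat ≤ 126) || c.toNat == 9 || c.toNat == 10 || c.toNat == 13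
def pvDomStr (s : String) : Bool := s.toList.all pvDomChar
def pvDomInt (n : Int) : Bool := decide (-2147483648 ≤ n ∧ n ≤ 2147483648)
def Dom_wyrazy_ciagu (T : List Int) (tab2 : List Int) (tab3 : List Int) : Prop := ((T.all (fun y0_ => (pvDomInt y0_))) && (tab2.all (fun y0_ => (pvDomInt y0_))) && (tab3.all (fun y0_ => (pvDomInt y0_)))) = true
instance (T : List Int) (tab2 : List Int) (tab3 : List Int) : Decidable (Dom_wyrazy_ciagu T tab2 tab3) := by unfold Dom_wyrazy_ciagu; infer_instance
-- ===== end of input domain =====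

-- B replaces A's in-place extension of T with a single fixed-window sweep of the recurrence that records only
-- the queried terms (objective: alternative; A mutates its argument T in place, B does not — the claim is about
-- the RETURN value only).

-- ===== PORT A =====
def wyrazy_ciagu (T : List Int) (tab2 : List Int) (tab3 : List Int) : List Int :=
  let maks := tab3.foldl (fun m k => if k > m then k else m) (PySem.List.pyGetD tab3 0 0)
  let T2 := (PySem.List.pyRange (T.length : Int) (maks + 1) 1).foldl
    (fun Tc n =>
      (tab2.foldl
        (fun (st : List Int × Int) wart =>
          (PySem.List.pySetD st.1 n
             (PySem.List.pyGetD st.1 n 0 + wart * PySem.List.pyGetD st.1 (n - st.2) 0),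
           st.2 + 1))
        (Tc ++ [0], 1)).1)
    T
  tab3.foldl (fun acc w => acc ++ [PySem.List.pyGetD T2 w 0]) []

-- ===== PORT B =====
def wyrazy_ciagu_alt (T : List Int) (tab2 : List Int) (tab3 : List Int) : List Int :=
  let k : Int := tab2.length
  let L0 : Int := T.length
  let maks := (PySem.List.max? tab3 (fun x => x)).getD 0
  let L := max L0 (maks + 1)
  let idx := tab3.map (fun w => if 0 ≤ w then w else L + w)
  let wanted := PySem.Set.ofList (idx.filter (fun i => L0 ≤ i))
  let window := (PySem.List.slice T (some (L0 - k)) none).reverse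
  let st := (PySem.List.pyRange L0 (maks + 1) 1).foldl
    (fun (st : PySem.Dict Int Int × List Int) n =>
      let v := ((tab2.zip st.2).map (fun p => p.1 * p.2)).sum
      ((if PySem.Set.contains wanted n then st.1.insert n v else st.1),
       v :: PySem.List.slice st.2 none (some (-1))))
    (PySem.Dict.empty, window)
  idx.map (fun i => if i < L0 then PySem.List.pyGetD T i 0 else st.1.getD i 0)

-- ===== PRECONDITION & SPEC =====
-- max(tab3) in closed form (running maximum)
def pvMaks (tab3 : List Int) : Int := tab3.foldl (fun m k => max m k) (tab3.headD 0)

-- Pre_ excludes: tab3 = [] and query indices below -(final length), where A raises IndexError; and inputs that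
-- need terms beyond T while T has fewer initial terms than tab2 has coefficients — there the recurrence is
-- underdetermined and A's values come from negative-index wraparound into the very list it is mutating, while
-- B raises ValueError.
def Pre_wyrazy_ciagu (T : List Int) (tab2 : List Int) (tab3 : List Int) : Prop :=
  tab3 ≠ [] ∧
  (∀ w ∈ tab3, -(max (T.length : Int) (pvMaks tab3 + 1)) ≤ w) ∧
  ((T.length : Int) ≤ pvMaks tab3 → tab2.length ≤ T.length)
instance (T : List Int) (tab2 : List Int) (tab3 : List Int) : Decidable (Pre_wyrazy_ciagu T tab2 tab3) := by
  unfold Pre_wyrazy_ciagu; infer_instance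

def pvWitness_wyrazy_ciagu : List Int × List Int × List Int := ([1, 1], [1, 1], [5])

def Spec_wyrazy_ciagu (T : List Int) (tab2 : List Int) (tab3 : List Int) (out : List Int) : Prop := out = wyrazy_ciagu_alt T tab2 tab3
instance (T : List Int) (tab2 : List Int) (tab3 : List Int) (out : List Int) : Decidable (Spec_wyrazy_ciagu T tab2 tab3 out) := by unfold Spec_wyrazy_ciagu; infer_instance

-- ===== CLAIM (what is proved, stated in full; the proofs are below) =====
def Claim_equal_wyrazy_ciagu : Prop := ∀ (T : List Int) (tab2 : List Int) (tab3 : List Int), Dom_wyrazy_ciagu T tab2 tab3 → Pre_wyrazy_ciagu T tab2 tab3 → Spec_wyrazy_ciagu T tab2 tab3 (wyrazy_ciagu T tab2 tab3)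

-- ===== LEMMAS AND PROOFS =====

-- the common reference: the sequence, extended one term at a time
def pvDot (cs l : List Int) : Int := ((cs.zip l).map (fun p => p.1 * p.2)).sum
def pvE (cs T : List Int) : Nat → List Int
  | 0 => T
  | m + 1 => pvE cs T m ++ [pvDot cs (pvE cs T m).reverse]

theorem pvDot_cons (c x : Int) (cs l : List Int) : pvDot (c :: cs) (x :: l) = c * x + pvDot cs l := by
  simp [pvDot, List.zip]

theorem set_last (B0 : List Int) (a v : Int) : (B0 ++ [a]).set B0.length v = B0 ++ [v] := by simp

theorem getD_last (B0 : List Int) (a : Int) : (B0 ++ [a]).getD B0.length 0 = a := by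
  rw [List.getD_eq_getElem?_getD, List.getElem?_concat_length]; rfl

theorem getD_left (B0 : List Int) (a : Int) (q : Nat) (hq : q < B0.length) : (B0 ++ [a]).getD q 0 = B0[q] := by
  rw [List.getD_eq_getElem?_getD, List.getElem?_append_left hq]; simp [hq]

theorem take_succ_reverse (B0 : List Int) (q : Nat) (hq : q < B0.length) :
    (B0.take (q+1)).reverse = B0[q] :: (B0.take q).reverse := by
  rw [List.take_add_one]; simp [List.getElem?_eq_getElem hq]

theorem length_pvE (cs T : List Int) (m : Nat) : (pvE cs T m).length = T.length + m := by
  induction m with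
  | zero => rfl
  | succ m ih => simp [pvE, ih]; omega

theorem innerA (cs B0 : List Int) (a : Int) (p : Nat)
    (h1 : 1 ≤ p) (h2 : p + cs.length ≤ B0.length + 1) :
    (cs.foldl
      (fun (st : List Int × Int) wart =>
        (PySem.List.pySetD st.1 (B0.length : Int)
           (PySem.List.pyGetD st.1 (B0.length : Int) 0 +
             wart * PySem.List.pyGetD st.1 ((B0.length : Int) - st.2) 0),
         st.2 + 1))
      (B0 ++ [a], (p : Int)))
    = (B0 ++ [a + pvDot cs ((B0.take (B0.length + 1 - p)).reverse)], ((p + cs.length : Nat) : Int)) := by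
  induction cs generalizing a p with
  | nil => simp [pvDot]
  | cons c cs ih =>
    have hp : p ≤ B0.length := by simp at h2; omega
    have hq : B0.length - p < B0.length := by omega
    rw [List.foldl_cons]
    have e1 : PySem.List.pyGetD (B0 ++ [a]) ((B0.length : Int)) 0 = a := by
      rw [PySem.List.pyGetD_natCast, getD_last]
    have e2 : ((B0.length : Int) - (p : Int)) = ((B0.length - p : Nat) : Int) := by push_cast; omega
    have e3 : PySem.List.pyGetD (B0 ++ [a]) ((B0.length : Int) - (p : Int)) 0 = B0[B0.length - p] := by
      rw [e2, PySem.List.pyGetD_natCast, getD_left _ _ _ hq]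
    have e4 : PySem.List.pySetD (B0 ++ [a]) ((B0.length : Int)) (a + c * B0[B0.length - p]) =
        B0 ++ [a + c * B0[B0.length - p]] := by
      rw [PySem.List.pySetD_natCast, set_last]
    simp only [e1, e3, e4]
    have e5 : ((p : Int) + 1) = (((p + 1 : Nat)) : Int) := by push_cast; ring
    rw [e5, ih (a + c * B0[B0.length - p]) (p + 1) (by omega) (by simp at h2; omega)]
    have e6 : B0.length + 1 - p = (B0.length - p) + 1 := by omega
    have e7 : B0.length + 1 - (p + 1) = B0.length - p := by omega
    rw [e6, e7, take_succ_reverse _ _ hq, pvDot_cons]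
    simp only [Prod.mk.injEq, List.append_cancel_left_eq, List.cons.injEq, List.length_cons]
    refine ⟨⟨by ring, trivial⟩, by push_cast; ring⟩

theorem outerA (cs T : List Int) (hk : cs.length ≤ T.length) (t : Nat) : ∀ j : Nat,
    (PySem.List.pyRange ((T.length : Int) + j) ((T.length : Int) + j + t) 1).foldl
      (fun Tc n =>
        (cs.foldl
          (fun (st : List Int × Int) wart =>
            (PySem.List.pySetD st.1 n
               (PySem.List.pyGetD st.1 n 0 + wart * PySem.List.pyGetD st.1 (n - st.2) 0),
             st.2 + 1))
          (Tc ++ [0], 1)).1)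
      (pvE cs T j)
    = pvE cs T (j + t) := by
  induction t with
  | zero =>
    intro j
    rw [PySem.List.pyRange_one_eq_nil (by omega)]
    rfl
  | succ t ih =>
    intro j
    rw [PySem.List.pyRange_one_cons (by push_cast; omega)]
    simp only [List.foldl_cons]
    have hstep : (cs.foldl (fun (st : List Int × Int) wart =>
        (PySem.List.pySetD st.1 ((T.length:Int) + j)
           (PySem.List.pyGetD st.1 ((T.length:Int) + j) 0 + wart * PySem.List.pyGetD st.1 (((T.length:Int) + j) - st.2) 0),
         st.2 + 1)) (pvE cs T j ++ [0], 1)).1 = pvE cs T (j+1) := by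
      have h := innerA cs (pvE cs T j) 0 1 (by omega) (by rw [length_pvE]; omega)
      rw [show (((1:Nat)):Int) = (1:Int) from by norm_num] at h
      rw [show ((T.length:Int) + j) = (((pvE cs T j).length : Nat) : Int) from by rw [length_pvE]; push_cast; ring]
      rw [h]
      simp [pvE]
    rw [hstep]
    rw [show ((T.length:Int) + j + 1 : Int) = (T.length:Int) + ((j+1 : Nat) : Int) from by push_cast; ring]
    rw [show ((T.length:Int) + j + ((t+1 : Nat) : Int) : Int) = (T.length:Int) + ((j+1 : Nat) : Int) + (t : Int) from by push_cast; ring]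
    rw [ih (j+1)]
    congr 1
    omega

theorem zip_take_self {α β : Type} (cs : List α) (l : List β) :
    cs.zip (l.take cs.length) = cs.zip l := by
  induction cs generalizing l with
  | nil => rfl
  | cons c cs ih => cases l with
    | nil => rfl
    | cons x l => simpa [List.zip] using ih l

theorem pvE_prefix (cs T : List Int) (j m : Nat) (h : j ≤ m) :
    ∃ t, pvE cs T m = pvE cs T j ++ t := by
  induction m with
  | zero => exact ⟨[], by simp [Nat.le_zero.mp h]⟩
  | succ m ih =>
    rcases Nat.lt_or_ge j (m+1) with hj | hj
    · obtain ⟨t, ht⟩ := ih (by omega)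
      exact ⟨t ++ [pvDot cs (pvE cs T m).reverse], by simp [pvE, ht]⟩
    · refine ⟨[], ?_⟩
      have h' : j = m + 1 := by omega
      subst h'
      simp

theorem pvE_getElem_stable (cs T : List Int) (j m i : Nat) (h : j ≤ m) (hi : i < T.length + j) :
    (pvE cs T m)[i]? = (pvE cs T j)[i]? := by
  obtain ⟨t, ht⟩ := pvE_prefix cs T j m h
  rw [ht, List.getElem?_append_left (by rw [length_pvE]; omega)]

theorem dotW (cs W l : List Int) (hW : cs.length = 0 ∨ W = l.take cs.length) :
    ((cs.zip W).map (fun p => p.1 * p.2)).sum = pvDot cs l := by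
  rcases hW with h | h
  · rw [List.length_eq_zero_iff] at h; subst h; simp [pvDot]
  · subst h; unfold pvDot; rw [zip_take_self]

theorem pvE_last (cs T : List Int) (j m : Nat) (hj : j < m) :
    PySem.List.pyGetD (pvE cs T m) ((T.length + j : Nat) : Int) 0 = pvDot cs (pvE cs T j).reverse := by
  rw [PySem.List.pyGetD_natCast, List.getD_eq_getElem?_getD,
      pvE_getElem_stable cs T (j+1) m _ (by omega) (by omega)]
  show ((pvE cs T j ++ [pvDot cs (pvE cs T j).reverse])[T.length + j]?).getD 0 = _
  rw [show T.length + j = (pvE cs T j).length from (length_pvE cs T j).symm, List.getElem?_concat_length]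
  rfl

theorem dropLast_take' (l : List Int) (k : Nat) (hk : k ≤ l.length) :
    (l.take k).dropLast = l.take (k - 1) := by
  rw [List.dropLast_eq_take, List.length_take, List.take_take]
  congr 1
  omega

theorem W_step (cs T : List Int) (hk : cs.length ≤ T.length) (j : Nat) (W : List Int)
    (hW : cs.length = 0 ∨ W = ((pvE cs T j).reverse).take cs.length) :
    cs.length = 0 ∨ (pvDot cs (pvE cs T j).reverse) :: (PySem.List.slice W none (some (-1)))
      = ((pvE cs T (j+1)).reverse).take cs.length := by
  rcases Nat.eq_zero_or_pos cs.length with h0 | h0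
  · exact Or.inl h0
  right
  have h : W = ((pvE cs T j).reverse).take cs.length := by
    rcases hW with h | h
    · omega
    · exact h
  rw [PySem.List.slice_to_neg_one, h]
  show _ = ((pvE cs T j ++ [pvDot cs (pvE cs T j).reverse]).reverse).take cs.length
  rw [List.reverse_append]
  simp only [List.reverse_singleton, List.singleton_append]
  obtain ⟨m, hm⟩ : ∃ m, cs.length = m + 1 := ⟨cs.length - 1, by omega⟩
  rw [hm, List.take_succ_cons,
      dropLast_take' _ _ (by rw [List.length_reverse, length_pvE]; omega)]
  norm_num

theorem loopB (cs T : List Int) (hk : cs.length ≤ T.length) (total : Nat)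
    (wanted : PySem.Set Int) (t : Nat) : ∀ (j : Nat), j + t = total →
    ∀ (vals : PySem.Dict Int Int) (W : List Int),
    (cs.length = 0 ∨ W = ((pvE cs T j).reverse).take cs.length) →
    (∀ i : Int, vals.getD i 0 =
      if PySem.Set.contains wanted i = true ∧ (T.length : Int) ≤ i ∧ i < (T.length : Int) + j
      then PySem.List.pyGetD (pvE cs T total) i 0 else 0) →
    ∀ i : Int,
      (((PySem.List.pyRange ((T.length : Int) + j) ((T.length : Int) + total) 1).foldl
        (fun (st : PySem.Dict Int Int × List Int) n =>
          ((if PySem.Set.contains wanted n then st.1.insert n (((cs.zip st.2).map (fun p => p.1 * p.2)).sum) else st.1),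
           (((cs.zip st.2).map (fun p => p.1 * p.2)).sum) :: PySem.List.slice st.2 none (some (-1))))
        (vals, W)).1).getD i 0 =
      if PySem.Set.contains wanted i = true ∧ (T.length : Int) ≤ i ∧ i < (T.length : Int) + total
      then PySem.List.pyGetD (pvE cs T total) i 0 else 0 := by
  induction t with
  | zero =>
    intro j hjt vals W hW hvals i
    rw [PySem.List.pyRange_one_eq_nil (by omega)]
    have hj : j = total := by omega
    subst hj
    exact hvals i
  | succ t ih =>
    intro j hjt vals W hW hvals i
    rw [PySem.List.pyRange_one_cons (by push_cast; omega)]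
    simp only [List.foldl_cons]
    have hv1 : ((cs.zip W).map (fun p => p.1 * p.2)).sum = pvDot cs (pvE cs T j).reverse :=
      dotW cs W _ hW
    have hv2 : pvDot cs (pvE cs T j).reverse
        = PySem.List.pyGetD (pvE cs T total) ((T.length : Int) + j) 0 := by
      rw [show ((T.length:Int) + j) = ((T.length + j : Nat):Int) from by push_cast; ring,
          pvE_last cs T j total (by omega)]
    simp only [hv1]
    rw [show ((T.length:Int) + j + 1 : Int) = (T.length:Int) + ((j+1 : Nat) : Int) from by push_cast; ring]
    refine ih (j+1) (by omega) _ _ (W_step cs T hk j W hW) ?_ i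
    intro i'
    by_cases hc : PySem.Set.contains wanted ((T.length:Int) + j) = true
    · simp only [hc, if_true]
      by_cases he : i' = (T.length:Int) + j
      · subst he
        rw [show PySem.Dict.getD (vals.insert ((T.length:Int) + j) (pvDot cs (pvE cs T j).reverse)) ((T.length:Int) + j) 0
              = ((vals.insert ((T.length:Int) + j) (pvDot cs (pvE cs T j).reverse)).get? ((T.length:Int) + j)).getD 0 from rfl,
            PySem.Dict.get?_insert_self]
        rw [if_pos ⟨hc, by omega, by omega⟩]
        exact hv2
      · rw [show PySem.Dict.getD (vals.insert ((T.length:Int) + j) (pvDot cs (pvE cs T j).reverse)) i' 0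
              = ((vals.insert ((T.length:Int) + j) (pvDot cs (pvE cs T j).reverse)).get? i').getD 0 from rfl,
            PySem.Dict.get?_insert_of_ne _ _ he]
        rw [show ((vals.get? i').getD 0 : Int) = vals.getD i' 0 from rfl, hvals i']
        by_cases hcond : PySem.Set.contains wanted i' = true ∧ (T.length : Int) ≤ i' ∧ i' < (T.length : Int) + j
        · rw [if_pos hcond, if_pos ⟨hcond.1, hcond.2.1, by push_cast; omega⟩]
        · rw [if_neg hcond, if_neg (by
            intro ⟨a1, a2, a3⟩
            exact hcond ⟨a1, a2, by push_cast at a3 ⊢; omega⟩)]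
    · rw [if_neg hc, hvals i']
      by_cases hcond : PySem.Set.contains wanted i' = true ∧ (T.length : Int) ≤ i' ∧ i' < (T.length : Int) + j
      · rw [if_pos hcond, if_pos ⟨hcond.1, hcond.2.1, by push_cast; omega⟩]
      · rw [if_neg hcond, if_neg (by
          intro ⟨a1, a2, a3⟩
          refine hcond ⟨a1, a2, ?_⟩
          push_cast at a3 ⊢
          have : i' ≠ (T.length:Int) + j := by
            intro he
            rw [he] at a1
            exact hc a1
          omega)]

theorem maksA_eq (tab3 : List Int) (h : tab3 ≠ []) :
    tab3.foldl (fun m k => if k > m then k else m) (PySem.List.pyGetD tab3 0 0) = pvMaks tab3 := by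
  have hf : (fun (m k : Int) => if k > m then k else m) = (fun (m k : Int) => max m k) := by
    funext m k
    rw [max_def]
    split_ifs <;> omega
  rw [hf]
  cases tab3 with
  | nil => simp at h
  | cons x t =>
    rw [PySem.List.pyGetD_zero_cons]
    rfl

theorem maksB_eq (tab3 : List Int) (h : tab3 ≠ []) :
    (PySem.List.max? tab3 (fun x => x)).getD 0 = pvMaks tab3 := by
  cases tab3 with
  | nil => simp at h
  | cons x t =>
    rw [PySem.List.max?_id_cons]
    show t.foldl max x = (x :: t).foldl (fun m k => max m k) x
    rw [show (fun (m k : Int) => max m k) = (fun (m k : Int) => m ⊔ k) from rfl]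
    rw [List.foldl_cons, max_self]

theorem le_pvMaks (tab3 : List Int) (w : Int) (hw : w ∈ tab3) : w ≤ pvMaks tab3 := by
  cases tab3 with
  | nil => simp at hw
  | cons x t =>
    show w ≤ (x :: t).foldl (fun m k => max m k) x
    rw [List.foldl_cons, max_self]
    rcases List.mem_cons.mp hw with h | h
    · subst h; exact (PySem.List.le_foldl_max t w).1
    · exact (PySem.List.le_foldl_max t x).2 w h

theorem pyGetD_neg_eq (xs : List Int) (w : Int) (h1 : -(xs.length:Int) ≤ w) (h2 : w < 0) :
    PySem.List.pyGetD xs w 0 = PySem.List.pyGetD xs ((xs.length : Int) + w) 0 := by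
  have hk1 : 0 < (-w).toNat := by omega
  have hk2 : (-w).toNat ≤ xs.length := by omega
  rw [show w = -(((-w).toNat : Nat) : Int) from by omega]
  rw [PySem.List.pyGetD_neg_natCast xs (-w).toNat 0 hk1 hk2]
  rw [show ((xs.length:Int) + -(((-w).toNat:Nat):Int)) = ((xs.length - (-w).toNat : Nat) : Int) from by push_cast; omega]
  rw [PySem.List.pyGetD_natCast, List.getD_eq_getElem?_getD, List.getElem?_eq_getElem (by omega)]
  rfl

theorem pvE_getD_low (cs T : List Int) (m : Nat) (i : Int) (h0 : 0 ≤ i) (hi : i < (T.length:Int)) :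
    PySem.List.pyGetD (pvE cs T m) i 0 = PySem.List.pyGetD T i 0 := by
  rw [show i = ((i.toNat : Nat):Int) from by omega, PySem.List.pyGetD_natCast, PySem.List.pyGetD_natCast,
      List.getD_eq_getElem?_getD, List.getD_eq_getElem?_getD,
      pvE_getElem_stable cs T 0 m i.toNat (by omega) (by omega)]
  rfl

-- ===== VERDICT (by name: the statement is the Claim_ definition above) =====
theorem wyrazy_ciagu_spec : Claim_equal_wyrazy_ciagu := by
  intro T tab2 tab3 _hdom hpre
  obtain ⟨h1, h2, h3⟩ := hpre
  unfold Spec_wyrazy_ciagu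
  simp only [wyrazy_ciagu, wyrazy_ciagu_alt]
  rw [maksA_eq tab3 h1, maksB_eq tab3 h1]
  rw [PySem.List.foldl_append_singleton_eq_map, List.nil_append, List.map_map]
  rcases (by omega : pvMaks tab3 + 1 ≤ (T.length : Int) ∨ (T.length : Int) < pvMaks tab3 + 1) with hc | hc
  · -- no extension: both loops are empty
    have hL : max ((T.length : Int)) (pvMaks tab3 + 1) = (T.length : Int) := max_eq_left (by omega)
    rw [hL]
    rw [PySem.List.pyRange_one_eq_nil (by omega)]
    simp only [List.foldl_nil]
    refine List.map_congr_left (fun w hw => ?_)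
    have hwM := le_pvMaks tab3 w hw
    have hw2 := h2 w hw
    rw [hL] at hw2
    simp only [Function.comp_apply]
    by_cases hw0 : 0 ≤ w
    · rw [if_pos hw0, if_pos (by omega : w < (T.length : Int))]
    · push_neg at hw0
      rw [if_neg (show ¬ ((0:Int) ≤ w) from by omega),
          if_pos (show (T.length : Int) + w < (T.length : Int) from by omega)]
      exact pyGetD_neg_eq T w (by omega) hw0
  · -- extension runs
    have hkn : tab2.length ≤ T.length := h3 (by omega)
    have hL : max ((T.length : Int)) (pvMaks tab3 + 1) = pvMaks tab3 + 1 := max_eq_right (by omega)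
    rw [hL]
    rw [hL] at h2
    set tot : Nat := (pvMaks tab3 + 1 - (T.length : Int)).toNat with htot
    -- A's loop
    have hA := outerA tab2 T hkn tot 0
    rw [show ((T.length : Int) + ((0 : Nat) : Int)) = (T.length : Int) from by norm_num] at hA
    rw [show ((T.length : Int) + ((tot : Nat) : Int)) = pvMaks tab3 + 1 from by omega] at hA
    simp only [pvE, Nat.zero_add] at hA
    rw [hA]
    -- B's loop
    have hW0 : tab2.length = 0 ∨
        (PySem.List.slice T (some ((T.length : Int) - (tab2.length : Int))) none).reverse
          = ((pvE tab2 T 0).reverse).take tab2.length := by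
      right
      rw [PySem.List.slice_from T (by omega),
          show ((T.length : Int) - (tab2.length : Int)).toNat = T.length - tab2.length from by omega]
      show (T.drop (T.length - tab2.length)).reverse = (T.reverse).take tab2.length
      rw [List.take_reverse]
    have hvals0 : ∀ i : Int, (PySem.Dict.empty : PySem.Dict Int Int).getD i 0 =
        if PySem.Set.contains (PySem.Set.ofList ((tab3.map (fun w => if 0 ≤ w then w else pvMaks tab3 + 1 + w)).filter (fun i => (T.length : Int) ≤ i))) i = true
            ∧ (T.length : Int) ≤ i ∧ i < (T.length : Int) + (0 : Nat)
        then PySem.List.pyGetD (pvE tab2 T tot) i 0 else 0 := by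
      intro i
      rw [if_neg (by
        rintro ⟨_, a, b⟩
        push_cast at b
        omega)]
      rfl
    have hB := loopB tab2 T hkn tot
      (PySem.Set.ofList ((tab3.map (fun w => if 0 ≤ w then w else pvMaks tab3 + 1 + w)).filter (fun i => (T.length : Int) ≤ i)))
      tot 0 (by omega) PySem.Dict.empty
      ((PySem.List.slice T (some ((T.length : Int) - (tab2.length : Int))) none).reverse)
      hW0 hvals0
    rw [show ((T.length : Int) + ((0 : Nat) : Int)) = (T.length : Int) from by norm_num] at hB
    rw [show ((T.length : Int) + ((tot : Nat) : Int)) = pvMaks tab3 + 1 from by omega] at hB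
    refine List.map_congr_left (fun w hw => ?_)
    have hwM := le_pvMaks tab3 w hw
    have hw2 := h2 w hw
    have hlen : (((pvE tab2 T tot).length : Nat) : Int) = pvMaks tab3 + 1 := by
      rw [length_pvE]; push_cast; omega
    simp only [Function.comp_apply]
    by_cases hw0 : 0 ≤ w
    · rw [if_pos hw0]
      by_cases hlt : w < (T.length : Int)
      · rw [if_pos hlt]
        exact pvE_getD_low tab2 T tot w hw0 hlt
      · push_neg at hlt
        rw [if_neg (show ¬ (w < (T.length : Int)) from by omega)]
        rw [hB w, if_pos ⟨(PySem.Set.contains_iff _ _).mpr ((PySem.Set.mem_ofList _ _).mpr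
            (List.mem_filter.mpr ⟨List.mem_map.mpr ⟨w, hw, by rw [if_pos hw0]⟩, by simpa using hlt⟩)),
          by omega, by omega⟩]
    · push_neg at hw0
      rw [if_neg (show ¬ ((0:Int) ≤ w) from by omega)]
      have hA2 : PySem.List.pyGetD (pvE tab2 T tot) w 0
          = PySem.List.pyGetD (pvE tab2 T tot) (pvMaks tab3 + 1 + w) 0 := by
        rw [pyGetD_neg_eq (pvE tab2 T tot) w (by omega) hw0, hlen]
      rw [hA2]
      by_cases hlt : pvMaks tab3 + 1 + w < (T.length : Int)
      · rw [if_pos hlt]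
        exact pvE_getD_low tab2 T tot _ (by omega) hlt
      · push_neg at hlt
        rw [if_neg (show ¬ (pvMaks tab3 + 1 + w < (T.length : Int)) from by omega)]
        rw [hB (pvMaks tab3 + 1 + w), if_pos ⟨(PySem.Set.contains_iff _ _).mpr ((PySem.Set.mem_ofList _ _).mpr
            (List.mem_filter.mpr ⟨List.mem_map.mpr ⟨w, hw, by rw [if_neg (by omega)]⟩, by simpa using hlt⟩)),
          by omega, by omega⟩]
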